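-- pv_equiv track=rewrite | github.com/dywsy21/Algorithm-Design-and-Analysis-Projects | ComplexDNAAligning/main.py | build_segment_graph
-- ===== SOURCE A (Python) =====
-- def build_segment_graph(segments):
--     """Build a directed acyclic graph from segments"""
--     # Sort segments by query start position
--     segments.sort(key=lambda x: x[0])
--
--     # Create graph representation
--     graph = {i: [] for i in range(len(segments))}
--
--     # Add source and sink nodes
--     graph[-1] = []  # Source
--     graph[len(segments)] = []  # Sink
--
--     # Connect source to all nodes
--     for i in range(len(segments)):
--         q_start, q_end, r_start, r_end, score, _ = segments[i]
--         graph[-1].append((i, score))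
--
--     # Connect all nodes to sink
--     for i in range(len(segments)):
--         graph[i].append((len(segments), 0))
--
--     # Connect compatible segments
--     for i in range(len(segments)):
--         q_end_i = segments[i][1]
--
--         for j in range(i + 1, len(segments)):
--             q_start_j = segments[j][0]
--
--             # If segments don't overlap in query
--             if q_start_j > q_end_i:
--                 # Add edge with weight = score of destination segment
--                 graph[i].append((j, segments[j][4]))
--
--     return graph
-- ===== SOURCE B (Python) =====
-- def build_segment_graph(segments):
--     """Build a directed acyclic graph from segments"""
--     # Sort segments by query start position (in place, like the original)
--     segments.sort(key=lambda x: x[0])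
--     n = len(segments)
--     starts = [s[0] for s in segments]
--
--     def first_after(lo, hi, v):
--         # first index in [lo, hi) with starts[idx] > v (starts is sorted)
--         while lo < hi:
--             mid = (lo + hi) // 2
--             if starts[mid] <= v:
--                 lo = mid + 1
--             else:
--                 hi = mid
--         return lo
--
--     rows = []
--     for i in range(n):
--         k = first_after(i + 1, n, segments[i][1])
--         rows.append((i, [(n, 0)] + [(j, segments[j][4]) for j in range(k, n)]))
--     rows.append((-1, [(i, s[4]) for i, s in enumerate(segments)]))
--     rows.append((n, []))
--     return dict(rows)
-- ===== Notes on version B (the rewrite author's own statement) =====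
-- stated objective: alternative
-- what changed: B replaces A's inner linear compatibility scan by a hand-written binary search into the sorted start positions and builds each adjacency row (and the source/sink rows) directly as a list instead of mutating a dict entry by entry.
import Mathlib
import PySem

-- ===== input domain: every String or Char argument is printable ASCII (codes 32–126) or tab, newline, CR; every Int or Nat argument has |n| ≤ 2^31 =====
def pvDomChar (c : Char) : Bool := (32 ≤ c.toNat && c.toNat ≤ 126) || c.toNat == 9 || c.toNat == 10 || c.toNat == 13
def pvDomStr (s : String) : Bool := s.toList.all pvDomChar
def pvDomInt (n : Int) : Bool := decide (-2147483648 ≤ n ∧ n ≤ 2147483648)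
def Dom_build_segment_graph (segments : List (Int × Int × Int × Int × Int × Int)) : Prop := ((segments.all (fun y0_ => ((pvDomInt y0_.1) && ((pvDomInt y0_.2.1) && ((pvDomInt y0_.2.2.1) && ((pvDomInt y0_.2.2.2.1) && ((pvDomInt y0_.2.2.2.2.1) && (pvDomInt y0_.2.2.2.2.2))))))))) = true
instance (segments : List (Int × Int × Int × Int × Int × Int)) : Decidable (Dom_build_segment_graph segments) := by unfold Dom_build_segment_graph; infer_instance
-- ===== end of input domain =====

-- B replaces A's inner linear compatibility scan by a binary search into the sorted start
-- positions and builds the adjacency rows directly instead of mutating a dict (objective: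
-- alternative).  Both A and B sort the argument list in place; the equivalence proved here
-- is about the RETURN value (the sort mutation is identical in both).

-- ===== PORT A =====
def build_segment_graph (segments : List (Int × Int × Int × Int × Int × Int)) : List (Int × List (Int × Int)) :=
  let qs := PySem.List.sorted segments (fun x => x.1)
  let n : Int := (qs.length : Int)
  let d0 : Int × Int × Int × Int × Int × Int := (0, 0, 0, 0, 0, 0)
  -- graph = {i: [] for i in range(len(segments))}
  let g1 := (PySem.List.pyRange 0 n).foldl
      (fun (g : PySem.Dict Int (List (Int × Int))) i => g.insert i []) (PySem.Dict.mk [])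
  -- graph[-1] = []; graph[len(segments)] = []
  let g2 := (g1.insert (-1) []).insert n []
  -- connect source to all nodes
  let g3 := (PySem.List.pyRange 0 n).foldl
      (fun g i => g.modify (-1) [] (fun e => e ++ [(i, (PySem.List.pyGetD qs i d0).2.2.2.2.1)])) g2
  -- connect all nodes to sink
  let g4 := (PySem.List.pyRange 0 n).foldl
      (fun g i => g.modify i [] (fun e => e ++ [(n, 0)])) g3
  -- connect compatible segments
  let g5 := (PySem.List.pyRange 0 n).foldl
      (fun g i =>
        let qendi := (PySem.List.pyGetD qs i d0).2.1
        (PySem.List.pyRange (i + 1) n).foldl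
          (fun g j =>
            if (PySem.List.pyGetD qs j d0).1 > qendi then
              g.modify i [] (fun e => e ++ [(j, (PySem.List.pyGetD qs j d0).2.2.2.2.1)])
            else g) g) g4
  g5.items

-- ===== PORT B =====
-- hand-written binary search from Source B: first index in [lo, hi) with starts[idx] > v
def firstAfter (starts : List Int) (v : Int) (lo hi : Nat) : Nat :=
  if _h : lo < hi then
    let mid := (lo + hi) / 2
    if starts.getD mid 0 ≤ v then firstAfter starts v (mid + 1) hi
    else firstAfter starts v lo mid
  else lo
termination_by hi - lo
decreasing_by all_goals omega

def build_segment_graph_alt (segments : List (Int × Int × Int × Int × Int × Int)) : List (Int × List (Int × Int)) :=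
  let qs := PySem.List.sorted segments (fun x => x.1)
  let n := qs.length
  let d0 : Int × Int × Int × Int × Int × Int := (0, 0, 0, 0, 0, 0)
  let starts := qs.map (fun s => s.1)
  let rows :=
    (List.range n).map (fun i =>
      let k := firstAfter starts (qs.getD i d0).2.1 (i + 1) n
      ((i : Int), ((n : Int), (0 : Int)) ::
        (List.range' k (n - k)).map (fun (j : Nat) => ((j : Int), (qs.getD j d0).2.2.2.2.1))))
  let rows := rows ++ [((-1 : Int), (PySem.List.enumerate qs).map (fun p => (p.1, p.2.2.2.2.2.1)))]
  let rows := rows ++ [((n : Int), ([] : List (Int × Int)))]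
  (rows.foldl (fun (d : PySem.Dict Int (List (Int × Int))) p => d.insert p.1 p.2)
      (PySem.Dict.mk [])).items

-- ===== PRECONDITION & SPEC =====
def Spec_build_segment_graph (segments : List (Int × Int × Int × Int × Int × Int)) (out : List (Int × List (Int × Int))) : Prop := out = build_segment_graph_alt segments
instance (segments : List (Int × Int × Int × Int × Int × Int)) (out : List (Int × List (Int × Int))) : Decidable (Spec_build_segment_graph segments out) := by unfold Spec_build_segment_graph; infer_instance

-- ===== CLAIM (what is proved, stated in full; the proofs are below) =====
def Claim_equal_build_segment_graph : Prop := ∀ (segments : List (Int × Int × Int × Int × Int × Int)), Dom_build_segment_graph segments → Spec_build_segment_graph segments (build_segment_graph segments)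

-- ===== LEMMAS AND PROOFS =====

theorem dict_insert_fresh {ν : Type} (l : List (Int × ν)) (k : Int) (v : ν)
    (h : ∀ p ∈ l, p.1 ≠ k) :
    (PySem.Dict.mk l).insert k v = PySem.Dict.mk (l ++ [(k, v)]) := by
  unfold PySem.Dict.insert PySem.Dict.contains
  rw [if_neg]
  simp only [List.any_eq_true, not_exists, beq_iff_eq]
  push Not
  intro p hp
  simp [h p hp]

theorem dict_fold_insert_fresh {ν : Type} :
    ∀ (rows : List (Int × ν)) (acc : List (Int × ν)),
      (rows.map Prod.fst).Nodup →
      (∀ p ∈ acc, ∀ q ∈ rows, p.1 ≠ q.1) →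
      rows.foldl (fun d p => d.insert p.1 p.2) (PySem.Dict.mk acc) = PySem.Dict.mk (acc ++ rows)
  | [], acc, _, _ => by simp
  | r :: rows, acc, hnd, hdisj => by
    simp only [List.foldl_cons]
    rw [dict_insert_fresh _ _ _ (fun p hp => hdisj p hp r (by simp))]
    rw [dict_fold_insert_fresh rows (acc ++ [(r.1, r.2)])
      (by simpa using hnd.of_cons)
      (by
        intro p hp q hq
        rcases List.mem_append.1 hp with hp | hp
        · exact hdisj p hp q (by simp [hq])
        · simp only [List.mem_singleton] at hp
          subst hp
          simp only [List.map_cons, List.nodup_cons] at hnd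
          intro hEq
          exact hnd.1 (hEq ▸ List.mem_map_of_mem hq))]
    simp

theorem dict_modify_mid {ν : Type} (l1 l2 : List (Int × ν)) (k : Int) (w v0 : ν) (f : ν → ν)
    (h1 : ∀ p ∈ l1, p.1 ≠ k) (h2 : ∀ p ∈ l2, p.1 ≠ k) :
    (PySem.Dict.mk (l1 ++ (k, w) :: l2)).modify k v0 f = PySem.Dict.mk (l1 ++ (k, f w) :: l2) := by
  unfold PySem.Dict.modify PySem.Dict.insert PySem.Dict.contains PySem.Dict.getD PySem.Dict.get?
  have hfind : List.find? (fun p => p.1 == k) (l1 ++ (k, w) :: l2) = some (k, w) := by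
    rw [List.find?_append]
    have : List.find? (fun p => p.1 == k) l1 = none := by
      rw [List.find?_eq_none]
      intro p hp; simp [h1 p hp]
    simp [this]
  rw [if_pos]
  · simp only [hfind, Option.map_some, Option.getD_some]
    congr 1
    rw [List.map_append]
    congr 1
    · have := List.map_congr_left (l := l1) (f := fun p : Int × ν => if (p.1 == k) = true then (k, f w) else p) (g := id) (by intro p hp; simp [h1 p hp])
      simpa using this
    · simp only [List.map_cons, beq_self_eq_true, if_pos]
      congr 1
      have := List.map_congr_left (l := l2) (f := fun p : Int × ν => if (p.1 == k) = true then (k, f w) else p) (g := id) (by intro p hp; simp [h2 p hp])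
      simpa using this
  · simp only [List.any_eq_true]
    exact ⟨(k, w), by simp⟩

theorem fold_modify_append {β : Type} (c : Int → Prop) [DecidablePred c] (g : Int → β) :
    ∀ (idx : List Int) (l1 l2 : List (Int × List β)) (k : Int) (w : List β) (v0 : List β),
      (∀ p ∈ l1, p.1 ≠ k) → (∀ p ∈ l2, p.1 ≠ k) →
      idx.foldl (fun d j => if c j then d.modify k v0 (fun e => e ++ [g j]) else d)
          (PySem.Dict.mk (l1 ++ (k, w) :: l2))
        = PySem.Dict.mk (l1 ++ (k, w ++ (idx.filter (fun j => decide (c j))).map g) :: l2)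
  | [], l1, l2, k, w, v0, _, _ => by simp
  | j :: idx, l1, l2, k, w, v0, h1, h2 => by
    simp only [List.foldl_cons]
    by_cases hc : c j
    · rw [if_pos hc, dict_modify_mid l1 l2 k w v0 _ h1 h2,
        fold_modify_append c g idx l1 l2 k (w ++ [g j]) v0 h1 h2]
      simp [hc]
    · rw [if_neg hc, fold_modify_append c g idx l1 l2 k w v0 h1 h2]
      simp [hc]

theorem fold_each_upd {β : Type} (act : PySem.Dict Int (List β) → Int → PySem.Dict Int (List β))
    (upd : Int → List β → List β)
    (hact : ∀ (i : Int) (l1 : List (Int × List β)) (w : List β) (l2 : List (Int × List β)),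
      (∀ p ∈ l1, p.1 ≠ i) → (∀ p ∈ l2, p.1 ≠ i) →
      act (PySem.Dict.mk (l1 ++ (i, w) :: l2)) i = PySem.Dict.mk (l1 ++ (i, upd i w) :: l2)) :
    ∀ (idx : List Int) (vs : Int → List β) (pre tail : List (Int × List β)),
      idx.Nodup →
      (∀ i ∈ idx, ∀ p ∈ pre, p.1 ≠ i) →
      (∀ i ∈ idx, ∀ p ∈ tail, p.1 ≠ i) →
      idx.foldl act (PySem.Dict.mk (pre ++ idx.map (fun i => (i, vs i)) ++ tail))
        = PySem.Dict.mk (pre ++ idx.map (fun i => (i, upd i (vs i))) ++ tail)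
  | [], vs, pre, tail, _, _, _ => by simp
  | i :: idx, vs, pre, tail, hnd, hpre, htail => by
    simp only [List.foldl_cons, List.map_cons]
    have hstep : act (PySem.Dict.mk (pre ++ ((i, vs i) :: idx.map (fun i => (i, vs i))) ++ tail)) i
        = PySem.Dict.mk (pre ++ ((i, upd i (vs i)) :: idx.map (fun i => (i, vs i))) ++ tail) := by
      have := hact i pre (vs i) (idx.map (fun i => (i, vs i)) ++ tail)
        (hpre i (by simp))
        (by
          intro p hp
          rcases List.mem_append.1 hp with hp | hp
          · rcases List.mem_map.1 hp with ⟨x, hx, rfl⟩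
            simp only [List.nodup_cons] at hnd
            intro hEq; simp only at hEq; exact hnd.1 (hEq ▸ hx)
          · exact htail i (by simp) p hp)
      simpa using this
    rw [hstep]
    have := fold_each_upd act upd hact idx vs (pre ++ [(i, upd i (vs i))]) tail
      (hnd.of_cons)
      (by
        intro i' hi' p hp
        rcases List.mem_append.1 hp with hp | hp
        · exact hpre i' (by simp [hi']) p hp
        · simp only [List.mem_singleton] at hp; subst hp
          simp only [List.nodup_cons] at hnd
          intro hEq; simp only at hEq; subst hEq; exact hnd.1 hi')
      (fun i' hi' => htail i' (by simp [hi']))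
    simpa using this

theorem getD_mono_of_pairwise (starts : List Int) (hs : starts.Pairwise (· ≤ ·))
    (p q : Nat) (hpq : p ≤ q) (hq : q < starts.length) :
    starts.getD p 0 ≤ starts.getD q 0 := by
  rw [List.getD_eq_getElem _ _ (lt_of_le_of_lt hpq hq), List.getD_eq_getElem _ _ hq]
  rcases eq_or_lt_of_le hpq with rfl | h
  · exact le_refl _
  · exact List.pairwise_iff_getElem.1 hs p q _ hq h

theorem firstAfter_spec (starts : List Int) (v : Int) (hs : starts.Pairwise (· ≤ ·)) :
    ∀ (lo hi : Nat), lo ≤ hi → hi ≤ starts.length →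
      lo ≤ firstAfter starts v lo hi ∧ firstAfter starts v lo hi ≤ hi ∧
      (∀ m, lo ≤ m → m < firstAfter starts v lo hi → starts.getD m 0 ≤ v) ∧
      (∀ m, firstAfter starts v lo hi ≤ m → m < hi → v < starts.getD m 0) := by
  intro lo hi
  induction lo, hi using firstAfter.induct starts v with
  | case1 lo hi h mid hle ih =>
    intro _ hhi
    have hmideq : mid = (lo + hi) / 2 := rfl
    have hmid : lo ≤ mid ∧ mid < hi := by constructor <;> omega
    obtain ⟨ih1, ih2, ih3, ih4⟩ := ih (by omega) hhi
    rw [firstAfter, dif_pos h]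
    simp only [← hmideq, if_pos hle]
    refine ⟨by omega, by omega, ?_, by omega⟩
    intro m hm1 hm2
    by_cases hm : mid + 1 ≤ m
    · exact ih3 m hm hm2
    · exact le_trans (getD_mono_of_pairwise starts hs m mid (by omega) (by omega)) hle
  | case2 lo hi h mid hle ih =>
    intro _ hhi
    have hmideq : mid = (lo + hi) / 2 := rfl
    have hmid : lo ≤ mid ∧ mid < hi := by constructor <;> omega
    obtain ⟨ih1, ih2, ih3, ih4⟩ := ih (by omega) (by omega)
    rw [firstAfter, dif_pos h]
    simp only [← hmideq, if_neg hle]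
    refine ⟨by omega, by omega, by omega, ?_⟩
    intro m hm1 hm2
    by_cases hm : m < mid
    · exact ih4 m hm1 hm
    · exact lt_of_lt_of_le (not_le.mp hle)
        (getD_mono_of_pairwise starts hs mid m (by omega) (by omega))
  | case3 lo hi h =>
    intro hle _
    rw [firstAfter, dif_neg h]
    exact ⟨le_refl _, by omega, by omega, by omega⟩

theorem fold_modify_append_all {β : Type} (g : Int → β) :
    ∀ (idx : List Int) (l1 l2 : List (Int × List β)) (k : Int) (w : List β) (v0 : List β),
      (∀ p ∈ l1, p.1 ≠ k) → (∀ p ∈ l2, p.1 ≠ k) →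
      idx.foldl (fun d j => d.modify k v0 (fun e => e ++ [g j]))
          (PySem.Dict.mk (l1 ++ (k, w) :: l2))
        = PySem.Dict.mk (l1 ++ (k, w ++ idx.map g) :: l2)
  | [], l1, l2, k, w, v0, _, _ => by simp
  | j :: idx, l1, l2, k, w, v0, h1, h2 => by
    simp only [List.foldl_cons]
    rw [dict_modify_mid l1 l2 k w v0 _ h1 h2,
      fold_modify_append_all g idx l1 l2 k (w ++ [g j]) v0 h1 h2]
    simp

theorem starts_getD (qs : List (Int × Int × Int × Int × Int × Int)) (m : Nat)
    (hm : m < qs.length) (d0 : Int × Int × Int × Int × Int × Int) :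
    (qs.map (fun s => s.1)).getD m 0 = (qs.getD m d0).1 := by
  rw [List.getD_eq_getElem _ _ (by simpa using hm), List.getD_eq_getElem _ _ hm]
  simp


theorem dict_fold_insert_keys {ν : Type} :
    ∀ (idx : List Int) (acc : List (Int × ν)) (v : ν),
      idx.Nodup → (∀ p ∈ acc, ∀ i ∈ idx, p.1 ≠ i) →
      idx.foldl (fun d i => d.insert i v) (PySem.Dict.mk acc)
        = PySem.Dict.mk (acc ++ idx.map (fun i => (i, v)))
  | [], acc, v, _, _ => by simp
  | i :: idx, acc, v, hnd, hdisj => by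
    simp only [List.foldl_cons]
    rw [dict_insert_fresh _ _ _ (fun p hp => hdisj p hp i (by simp))]
    rw [dict_fold_insert_keys idx (acc ++ [(i, v)]) v hnd.of_cons
      (by
        intro p hp i' hi'
        rcases List.mem_append.1 hp with hp | hp
        · exact hdisj p hp i' (by simp [hi'])
        · simp only [List.mem_singleton] at hp; subst hp
          simp only [List.nodup_cons] at hnd
          intro hEq; simp only at hEq; subst hEq; exact hnd.1 hi')]
    simp

-- per-row equality: the filtered linear scan equals the binary-search suffix
theorem row_eq (qs : List (Int × Int × Int × Int × Int × Int))
    (hs : qs.Pairwise (fun a b => a.1 ≤ b.1)) (i : Nat) (hi : i < qs.length) :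
    ((PySem.List.pyRange ((i : Int) + 1) (qs.length : Int)).filter
        (fun j => decide ((PySem.List.pyGetD qs j (0,0,0,0,0,0)).1 > (PySem.List.pyGetD qs (i : Int) (0,0,0,0,0,0)).2.1))).map
      (fun j => (j, (PySem.List.pyGetD qs j (0,0,0,0,0,0)).2.2.2.2.1))
    = (List.range' (firstAfter (qs.map (fun s => s.1)) ((qs.getD i (0,0,0,0,0,0)).2.1) (i + 1) qs.length)
        (qs.length - firstAfter (qs.map (fun s => s.1)) ((qs.getD i (0,0,0,0,0,0)).2.1) (i + 1) qs.length)).map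
      (fun (j : Nat) => ((j : Int), (qs.getD j (0,0,0,0,0,0)).2.2.2.2.1)) := by
  have hs' : (qs.map (fun s => s.1)).Pairwise (· ≤ ·) := by
    rw [List.pairwise_map]; exact hs
  set v := (qs.getD i (0,0,0,0,0,0)).2.1 with hv
  set k := firstAfter (qs.map (fun s => s.1)) v (i + 1) qs.length with hk
  obtain ⟨hk1, hk2, hbelow, habove⟩ :=
    firstAfter_spec (qs.map (fun s => s.1)) v hs' (i + 1) qs.length (by omega) (by simp)
  have hvI : (PySem.List.pyGetD qs (i : Int) (0,0,0,0,0,0)).2.1 = v := by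
    rw [PySem.List.pyGetD_natCast]
  -- split the range at k
  have hsplit : PySem.List.pyRange ((i : Int) + 1) (qs.length : Int)
      = PySem.List.pyRange ((i : Int) + 1) (k : Int) ++ PySem.List.pyRange (k : Int) (qs.length : Int) := by
    apply PySem.List.pyRange_one_append <;> omega
  have hcond : ∀ (m : Nat), m < qs.length →
      ((PySem.List.pyGetD qs ((m : Nat) : Int) (0,0,0,0,0,0)).1 > v ↔ v < (qs.map (fun s => s.1)).getD m 0) := by
    intro m hm
    rw [PySem.List.pyGetD_natCast, starts_getD qs m hm]
  rw [hvI, hsplit, List.filter_append]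
  have hnil : (PySem.List.pyRange ((i : Int) + 1) (k : Int)).filter
      (fun j => decide ((PySem.List.pyGetD qs j (0,0,0,0,0,0)).1 > v)) = [] := by
    rw [List.filter_eq_nil_iff]
    intro j hj
    rw [PySem.List.mem_pyRange_one] at hj
    lift j to Nat using (by omega) with m
    simp only [decide_eq_true_eq]
    rw [hcond m (by omega)]
    push Not
    exact hbelow m (by omega) (by omega)
  have hself : (PySem.List.pyRange (k : Int) (qs.length : Int)).filter
      (fun j => decide ((PySem.List.pyGetD qs j (0,0,0,0,0,0)).1 > v))
      = PySem.List.pyRange (k : Int) (qs.length : Int) := by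
    rw [List.filter_eq_self]
    intro j hj
    rw [PySem.List.mem_pyRange_one] at hj
    lift j to Nat using (by omega) with m
    simp only [decide_eq_true_eq]
    rw [hcond m (by omega)]
    exact habove m (by omega) (by omega)
  rw [hnil, hself, List.nil_append]
  -- both sides are maps over an arithmetic range
  rw [PySem.List.pyRange_one, List.range'_eq_map_range, List.map_map, List.map_map]
  have hlen : ((qs.length : Int) - (k : Int)).toNat = qs.length - k := by omega
  rw [hlen]
  apply List.map_congr_left
  intro t ht
  simp only [Function.comp_apply]
  have hjj : ((k : Int) + (t : Int)) = (((k + t : Nat) : Nat) : Int) := by push_cast; ring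
  rw [hjj, PySem.List.pyGetD_natCast]

theorem main_core (qs : List (Int × Int × Int × Int × Int × Int))
    (hs : qs.Pairwise (fun a b => a.1 ≤ b.1)) :
    (List.foldl
        (fun g i =>
          List.foldl
            (fun g j =>
              if (PySem.List.pyGetD qs j (0, 0, 0, 0, 0, 0)).1 > (PySem.List.pyGetD qs i (0, 0, 0, 0, 0, 0)).2.1 then
                g.modify i [] fun e => e ++ [(j, (PySem.List.pyGetD qs j (0, 0, 0, 0, 0, 0)).2.2.2.2.1)]
              else g)
            g (PySem.List.pyRange (i + 1) (qs.length : Int)))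
        (List.foldl (fun g i => g.modify i [] fun e => e ++ [((qs.length : Int), 0)])
          (List.foldl
            (fun g i => g.modify (-1) [] fun e => e ++ [(i, (PySem.List.pyGetD qs i (0, 0, 0, 0, 0, 0)).2.2.2.2.1)])
            (((List.foldl (fun g i => g.insert i []) (PySem.Dict.mk []) (PySem.List.pyRange 0 (qs.length : Int))).insert (-1)
                  []).insert
              (qs.length : Int) [])
            (PySem.List.pyRange 0 (qs.length : Int)))
          (PySem.List.pyRange 0 (qs.length : Int)))
        (PySem.List.pyRange 0 (qs.length : Int))).items =
    (List.foldl (fun d p => d.insert p.1 p.2) (PySem.Dict.mk [])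
        (List.map
              (fun (i : Nat) =>
                ((i : Int),
                  ((qs.length : Int), 0) ::
                    List.map (fun (j : Nat) => ((j : Int), (qs.getD j (0, 0, 0, 0, 0, 0)).2.2.2.2.1))
                      (List.range'
                        (firstAfter (List.map (fun x => x.1) qs) (qs.getD i (0, 0, 0, 0, 0, 0)).2.1 (i + 1) qs.length)
                        (qs.length -
                          firstAfter (List.map (fun x => x.1) qs) (qs.getD i (0, 0, 0, 0, 0, 0)).2.1 (i + 1)
                            qs.length))))
              (List.range qs.length) ++
            [(-1, List.map (fun p => (p.1, p.2.2.2.2.2.1)) (PySem.List.enumerate qs))] ++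
          [((qs.length : Int), [])])).items := by
  have hmemr : ∀ x ∈ PySem.List.pyRange 0 (qs.length : Int), 0 ≤ x ∧ x < (qs.length : Int) := by
    intro x hx; exact PySem.List.mem_pyRange_one.1 hx
  -- phase 1: the comprehension dict
  rw [dict_fold_insert_keys (PySem.List.pyRange 0 (qs.length : Int)) [] []
      (PySem.List.nodup_pyRange_one 0 _) (by simp)]
  -- phase 2: source and sink keys
  rw [dict_insert_fresh _ (-1) []
      (by
        intro p hp
        simp only [List.nil_append, List.mem_map] at hp
        obtain ⟨x, hx, rfl⟩ := hp
        have := hmemr x hx; omega)]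
  rw [dict_insert_fresh _ ((qs.length : Int)) []
      (by
        intro p hp
        simp only [List.nil_append, List.mem_append, List.mem_map, List.mem_singleton] at hp
        rcases hp with ⟨x, hx, rfl⟩ | rfl
        · have := hmemr x hx; omega
        · simp)]
  -- phase 3: the source edges
  have hshape3 : ([] ++ List.map (fun i => (i, ([] : List (Int × Int)))) (PySem.List.pyRange 0 (qs.length : Int)) ++ [(-1, [])] ++ [((qs.length : Int), [])])
      = (List.map (fun i => (i, ([] : List (Int × Int)))) (PySem.List.pyRange 0 (qs.length : Int)) ++ ((-1, ([] : List (Int × Int))) :: [((qs.length : Int), [])])) := by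
    simp
  rw [hshape3]
  rw [fold_modify_append_all (fun i => (i, (PySem.List.pyGetD qs i (0, 0, 0, 0, 0, 0)).2.2.2.2.1))
      (PySem.List.pyRange 0 (qs.length : Int)) _ _ (-1) [] []
      (by
        intro p hp
        simp only [List.mem_map] at hp
        obtain ⟨x, hx, rfl⟩ := hp
        have := hmemr x hx; omega)
      (by intro p hp; simp only [List.mem_singleton] at hp; subst hp; simp)]
  -- phase 4: the sink edges
  have hshape4 : (List.map (fun i => (i, ([] : List (Int × Int)))) (PySem.List.pyRange 0 (qs.length : Int)) ++ ((-1, [] ++ List.map (fun i => (i, (PySem.List.pyGetD qs i (0, 0, 0, 0, 0, 0)).2.2.2.2.1)) (PySem.List.pyRange 0 (qs.length : Int))) :: [((qs.length : Int), [])]))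
      = ([] ++ List.map (fun i => (i, ([] : List (Int × Int)))) (PySem.List.pyRange 0 (qs.length : Int)) ++ [(-1, List.map (fun i => (i, (PySem.List.pyGetD qs i (0, 0, 0, 0, 0, 0)).2.2.2.2.1)) (PySem.List.pyRange 0 (qs.length : Int))), ((qs.length : Int), [])]) := by
    simp
  rw [hshape4]
  have htail4 : ∀ i ∈ PySem.List.pyRange 0 (qs.length : Int),
      ∀ p ∈ [((-1 : Int), List.map (fun i => (i, (PySem.List.pyGetD qs i (0, 0, 0, 0, 0, 0)).2.2.2.2.1)) (PySem.List.pyRange 0 (qs.length : Int))), ((qs.length : Int), ([] : List (Int × Int)))], p.1 ≠ i := by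
    intro i hi p hp
    have := hmemr i hi
    rcases List.mem_cons.1 hp with rfl | hp
    · simp; omega
    · simp only [List.mem_singleton] at hp; subst hp; simp; omega
  rw [fold_each_upd (fun g i => g.modify i [] fun e => e ++ [((qs.length : Int), 0)])
      (fun _ w => w ++ [((qs.length : Int), 0)])
      (fun i l1 w l2 h1 h2 => dict_modify_mid l1 l2 i w [] _ h1 h2)
      (PySem.List.pyRange 0 (qs.length : Int)) (fun _ => []) [] _
      (PySem.List.nodup_pyRange_one 0 _) (by simp) htail4]
  -- phase 5: the compatibility edges
  rw [fold_each_upd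
      (fun g i =>
        List.foldl
          (fun g j =>
            if (PySem.List.pyGetD qs j (0, 0, 0, 0, 0, 0)).1 > (PySem.List.pyGetD qs i (0, 0, 0, 0, 0, 0)).2.1 then
              g.modify i [] fun e => e ++ [(j, (PySem.List.pyGetD qs j (0, 0, 0, 0, 0, 0)).2.2.2.2.1)]
            else g)
          g (PySem.List.pyRange (i + 1) (qs.length : Int)))
      (fun i w => w ++ ((PySem.List.pyRange (i + 1) (qs.length : Int)).filter
          (fun j => decide ((PySem.List.pyGetD qs j (0, 0, 0, 0, 0, 0)).1 > (PySem.List.pyGetD qs i (0, 0, 0, 0, 0, 0)).2.1))).map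
          (fun j => (j, (PySem.List.pyGetD qs j (0, 0, 0, 0, 0, 0)).2.2.2.2.1)))
      (fun i l1 w l2 h1 h2 =>
        fold_modify_append
          (fun j => (PySem.List.pyGetD qs j (0, 0, 0, 0, 0, 0)).1 > (PySem.List.pyGetD qs i (0, 0, 0, 0, 0, 0)).2.1)
          (fun j => (j, (PySem.List.pyGetD qs j (0, 0, 0, 0, 0, 0)).2.2.2.2.1))
          (PySem.List.pyRange (i + 1) (qs.length : Int)) l1 l2 i w [] h1 h2)
      (PySem.List.pyRange 0 (qs.length : Int)) (fun _ => [] ++ [((qs.length : Int), 0)]) [] _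
      (PySem.List.nodup_pyRange_one 0 _) (by simp) htail4]
  -- collapse B's dict of fresh keys
  rw [dict_fold_insert_fresh _ []
      (by
        simp only [List.map_append, List.map_map, List.map_cons, List.map_nil]
        rw [List.append_assoc]
        simp only [List.singleton_append]
        apply List.Nodup.append
        · exact List.Nodup.map (fun a b hab => by simpa using hab) (List.nodup_range)
        · refine List.nodup_cons.2 ⟨?_, List.nodup_singleton _⟩
          simp only [List.mem_singleton]
          omega
        · intro x hx hy
          simp only [List.mem_map] at hx
          obtain ⟨m, hm, rfl⟩ := hx
          simp only [List.mem_range] at hm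
          simp only [List.mem_cons, List.not_mem_nil, or_false] at hy
          rcases hy with hy | hy <;> simp only [Function.comp_apply] at hy ⊢ <;> omega)
      (by simp)]
  simp only [List.nil_append, List.append_assoc, List.singleton_append]
  congr 1
  · -- the per-node rows
    rw [PySem.List.pyRange_zero_natCast, List.map_map]
    apply List.map_congr_left
    intro i hi
    simp only [List.mem_range] at hi
    simp only [Function.comp_apply]
    refine congrArg _ ?_
    refine congrArg _ ?_
    exact row_eq qs hs i hi
  · -- source row
    congr 2
    rw [PySem.List.enumerate_eq_map_pyRange qs (0, 0, 0, 0, 0, 0), List.map_map]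
    simp [PySem.List.len_eq]

theorem build_eq_alt (segments : List (Int × Int × Int × Int × Int × Int)) :
    build_segment_graph segments = build_segment_graph_alt segments := by
  have hs := PySem.List.sorted_pairwise segments (fun x : Int × Int × Int × Int × Int × Int => x.1)
  simp only [build_segment_graph, build_segment_graph_alt]
  generalize h : PySem.List.sorted segments (fun x => x.1) = qs at hs ⊢
  exact main_core qs hs

-- ===== VERDICT (by name: the statement is the Claim_ definition above) =====
theorem build_segment_graph_spec : Claim_equal_build_segment_graph := by
  intro segments _
  unfold Spec_build_segment_graph
  exact build_eq_alt segments
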